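-- pv_equiv track=rewrite | github.com/queelius/computational-explorations | src/frontier_experiments.py | has_3ap
-- ===== SOURCE A (Python) =====
-- from typing import Set, List, Tuple, Dict, Any
--
-- def has_3ap(A: Set[int]) -> bool:
--     """Check if A contains a 3-term arithmetic progression."""
--     A_sorted = sorted(A)
--     A_set = set(A_sorted)
--     for i, a in enumerate(A_sorted):
--         for b in A_sorted[i + 1:]:
--             c = 2 * b - a
--             if c in A_set and c != b:
--                 return True
--     return False
-- ===== SOURCE B (Python) =====
-- def has_3ap(A):
--     """Check if A contains a 3-term arithmetic progression."""
--     xs = sorted(set(A))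
--     n = len(xs)
--     for j in range(1, n - 1):
--         i, k = j - 1, j + 1
--         while i >= 0 and k < n:
--             s = xs[i] + xs[k]
--             t = 2 * xs[j]
--             if s == t:
--                 return True
--             if s < t:
--                 k += 1
--             else:
--                 i -= 1
--     return False
-- ===== Notes on version B (the rewrite author's own statement) =====
-- stated objective: alternative
-- what changed: B replaces A's pair scan with hash-set membership test by the classic two-pointer expansion: sort-dedup once, then for each middle element walk one pointer left and one right, comparing the pair sum against twice the middle and moving the pointer on the smaller/larger side; no set lookup for the third term remains.
import Mathlib
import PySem

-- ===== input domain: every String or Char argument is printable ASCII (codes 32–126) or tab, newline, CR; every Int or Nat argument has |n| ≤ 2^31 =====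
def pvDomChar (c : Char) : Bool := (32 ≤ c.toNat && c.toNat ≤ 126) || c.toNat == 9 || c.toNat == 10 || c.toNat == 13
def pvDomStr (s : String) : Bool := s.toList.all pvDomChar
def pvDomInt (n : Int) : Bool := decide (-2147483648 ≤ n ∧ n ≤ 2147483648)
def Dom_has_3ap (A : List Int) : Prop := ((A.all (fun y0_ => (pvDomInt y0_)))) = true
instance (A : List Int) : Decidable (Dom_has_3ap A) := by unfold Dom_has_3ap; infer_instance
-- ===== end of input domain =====

-- B finds a 3-AP by the two-pointer expansion around each middle element of the sorted
-- deduplicated list, instead of A's pair scan with a set membership test; alternative algorithm, same cost.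


-- ===== PORT A =====
-- outer loop of A: for each a, scan the elements after it for b with 2*b-a in the set and ≠ b
def has3apLoopA (s : PySem.Set Int) : List Int → Bool
  | [] => false
  | a :: rest =>
      if rest.any (fun b => PySem.Set.contains s (2 * b - a) && decide (2 * b - a ≠ b)) then true
      else has3apLoopA s rest

def has_3ap (A : List Int) : Bool :=
  let A_sorted := PySem.List.sorted A (fun x => x) false
  let A_set := PySem.Set.ofList A_sorted
  has3apLoopA A_set A_sorted

-- ===== PORT B =====
-- the inner while loop of B: pointers i (moving left) and k (moving right) around the middle xs[j];
-- xs[i] is ported as pyGetD with default 0 — the loop guard keeps every index used in range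
def twoPtr (xs : List Int) (n j i k : Int) : Bool :=
  if h : 0 ≤ i ∧ k < n then
    if PySem.List.pyGetD xs i 0 + PySem.List.pyGetD xs k 0
        = 2 * PySem.List.pyGetD xs j 0 then true
    else if PySem.List.pyGetD xs i 0 + PySem.List.pyGetD xs k 0
        < 2 * PySem.List.pyGetD xs j 0 then twoPtr xs n j i (k + 1)
    else twoPtr xs n j (i - 1) k
  else false
termination_by ((i + 1).toNat + (n - k).toNat)
decreasing_by all_goals omega

def has_3ap_alt (A : List Int) : Bool :=
  let xs := PySem.List.sorted (PySem.Set.ofList A) (fun x => x) false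
  let n : Int := xs.length
  (PySem.List.pyRange 1 (n - 1) 1).any (fun j => twoPtr xs n j (j - 1) (j + 1))

-- ===== PRECONDITION & SPEC =====
def Spec_has_3ap (A : List Int) (out : Bool) : Prop := out = has_3ap_alt A
instance (A : List Int) (out : Bool) : Decidable (Spec_has_3ap A out) := by unfold Spec_has_3ap; infer_instance

-- ===== CLAIM (what is proved, stated in full; the proofs are below) =====
def Claim_equal_has_3ap : Prop := ∀ (A : List Int), Dom_has_3ap A → Spec_has_3ap A (has_3ap A)

-- ===== LEMMAS AND PROOFS =====

lemma pair_sublist_cons (a b x : Int) (t : List Int) :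
    [a, b].Sublist (x :: t) ↔ (a = x ∧ b ∈ t) ∨ [a, b].Sublist t := by
  rw [List.sublist_cons_iff]
  constructor
  · rintro (h | ⟨r, hr, hs⟩)
    · exact Or.inr h
    · cases hr; exact Or.inl ⟨rfl, List.singleton_sublist.mp hs⟩
  · rintro (⟨rfl, hb⟩ | h)
    · exact Or.inr ⟨[b], rfl, List.singleton_sublist.mpr hb⟩
    · exact Or.inl h

lemma loopA_iff (s : PySem.Set Int) (l : List Int) :
    has3apLoopA s l = true ↔
      ∃ a b, [a, b].Sublist l ∧ (2 * b - a) ∈ s ∧ 2 * b - a ≠ b := by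
  induction l with
  | nil =>
    simp only [has3apLoopA, Bool.false_eq_true, false_iff]
    rintro ⟨a, b, h, -⟩
    exact absurd h.length_le (by simp)
  | cons x t ih =>
    simp only [has3apLoopA]
    split_ifs with h
    · simp only [true_iff]
      rcases List.any_eq_true.mp h with ⟨b, hb, hcond⟩
      rw [Bool.and_eq_true] at hcond
      rcases hcond with ⟨hc, hne⟩
      refine ⟨x, b, (List.singleton_sublist.mpr hb).cons₂ x, ?_, of_decide_eq_true hne⟩
      simpa [PySem.Set.contains] using hc
    · rw [ih]
      constructor
      · rintro ⟨a, b, hs', hc, hne⟩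
        exact ⟨a, b, hs'.cons x, hc, hne⟩
      · rintro ⟨a, b, hs', hc, hne⟩
        rcases (pair_sublist_cons a b x t).mp hs' with ⟨rfl, hb⟩ | h'
        · exact absurd (List.any_eq_true.mpr ⟨b, hb, by
            simp [PySem.Set.contains, hc, hne]⟩) h
        · exact ⟨a, b, h', hc, hne⟩

-- a < b, both in a ≤-sorted list → [a,b] is a sublist
lemma pair_sublist_of_sorted {l : List Int} (hp : l.Pairwise (· ≤ ·))
    {a b : Int} (ha : a ∈ l) (hb : b ∈ l) (hab : a < b) : [a, b].Sublist l := by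
  induction l with
  | nil => cases ha
  | cons x t ih =>
    rcases List.pairwise_cons.mp hp with ⟨hx, hp'⟩
    rcases List.mem_cons.mp ha with rfl | ha'
    · have hb' : b ∈ t := by
        rcases List.mem_cons.mp hb with rfl | h
        · exact absurd hab (lt_irrefl _)
        · exact h
      exact (List.singleton_sublist.mpr hb').cons₂ a
    · have hb' : b ∈ t := by
        rcases List.mem_cons.mp hb with rfl | h
        · exact absurd (hx a ha') (not_le.mpr hab)
        · exact h
      exact (ih hp' ha' hb').cons x

-- A's search succeeds exactly when A's elements contain a strict 3-AP a < m < 2m-a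
lemma hasA_iff (A : List Int) :
    has_3ap A = true ↔ ∃ a m, a ∈ A ∧ m ∈ A ∧ a < m ∧ (2 * m - a) ∈ A := by
  unfold has_3ap
  rw [loopA_iff]
  have hperm := PySem.List.sorted_perm A (fun x => x) false
  have hmem : ∀ z : Int, z ∈ PySem.List.sorted A (fun x => x) false ↔ z ∈ A :=
    fun z => hperm.mem_iff
  have hset : ∀ z : Int,
      z ∈ PySem.Set.ofList (PySem.List.sorted A (fun x => x) false) ↔ z ∈ A := by
    intro z
    rw [← PySem.List.dedup_eq_ofList, PySem.List.mem_dedup]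
    exact hmem z
  have hpw : (PySem.List.sorted A (fun x => x) false).Pairwise (· ≤ ·) :=
    PySem.List.sorted_pairwise A (fun x => x)
  constructor
  · rintro ⟨a, b, hs, hc, hne⟩
    have ha : a ∈ A := (hmem a).mp (hs.subset (by simp))
    have hb : b ∈ A := (hmem b).mp (hs.subset (by simp))
    have hab : a ≤ b := by
      have := List.pairwise_iff_getElem.mp (hpw.sublist hs)
      simpa using this 0 1 (by simp) (by simp) (by omega)
    have hab' : a < b := lt_of_le_of_ne hab (by intro h; exact hne (by omega))
    exact ⟨a, b, ha, hb, hab', (hset _).mp hc⟩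
  · rintro ⟨a, m, ha, hm, ham, hc⟩
    refine ⟨a, m, pair_sublist_of_sorted hpw ((hmem a).mpr ha) ((hmem m).mpr hm) ham,
      (hset _).mpr hc, by omega⟩

-- value at an in-range Int index, monotone along a ≤-sorted list
lemma getD_mono {xs : List Int} (hs : xs.Pairwise (· ≤ ·)) {p q : Int}
    (hp : 0 ≤ p) (hpq : p ≤ q) (hq : q < (xs.length : Int)) :
    PySem.List.pyGetD xs p 0 ≤ PySem.List.pyGetD xs q 0 := by
  rw [PySem.List.pyGetD_eq_getElem xs (i := p) 0 hp (by omega),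
      PySem.List.pyGetD_eq_getElem xs (i := q) 0 (by omega) hq]
  rcases eq_or_lt_of_le hpq with rfl | h
  · exact le_refl _
  · exact List.pairwise_iff_getElem.mp hs p.toNat q.toNat (by omega) (by omega) (by omega)

lemma getD_strict_mono {xs : List Int} (hs : xs.Pairwise (· < ·)) {p q : Int}
    (hp : 0 ≤ p) (hpq : p < q) (hq : q < (xs.length : Int)) :
    PySem.List.pyGetD xs p 0 < PySem.List.pyGetD xs q 0 := by
  rw [PySem.List.pyGetD_eq_getElem xs (i := p) 0 hp (by omega),
      PySem.List.pyGetD_eq_getElem xs (i := q) 0 (by omega) hq]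
  exact List.pairwise_iff_getElem.mp hs p.toNat q.toNat (by omega) (by omega) (by omega)

-- two-pointer invariant: the loop from (i,k) succeeds iff some pair (i',k') with i' ≤ i, k' ≥ k sums to the target
lemma twoPtr_iff (xs : List Int) (hs : xs.Pairwise (· ≤ ·)) (j : Int) :
    ∀ (m : ℕ) (i k : Int), (i + 1).toNat + (((xs.length : Int)) - k).toNat ≤ m →
      0 ≤ k → i < (xs.length : Int) →
      (twoPtr xs (xs.length : Int) j i k = true ↔
        ∃ i' k', 0 ≤ i' ∧ i' ≤ i ∧ k ≤ k' ∧ k' < (xs.length : Int) ∧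
          PySem.List.pyGetD xs i' 0 + PySem.List.pyGetD xs k' 0
            = 2 * PySem.List.pyGetD xs j 0) := by
  intro m
  induction m with
  | zero =>
    intro i k hm hk hi
    rw [twoPtr, dif_neg (by omega)]
    simp only [Bool.false_eq_true, false_iff]
    rintro ⟨i', k', h1, h2, h3, h4, -⟩
    omega
  | succ m ih =>
    intro i k hm hk hi
    rw [twoPtr]
    by_cases hguard : 0 ≤ i ∧ k < (xs.length : Int)
    · rw [dif_pos hguard]
      by_cases heq : PySem.List.pyGetD xs i 0 + PySem.List.pyGetD xs k 0
          = 2 * PySem.List.pyGetD xs j 0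
      · rw [if_pos heq]
        simp only [true_iff]
        exact ⟨i, k, hguard.1, le_refl i, le_refl k, hguard.2, heq⟩
      · rw [if_neg heq]
        by_cases hlt : PySem.List.pyGetD xs i 0 + PySem.List.pyGetD xs k 0
            < 2 * PySem.List.pyGetD xs j 0
        · rw [if_pos hlt, ih i (k + 1) (by omega) (by omega) hi]
          constructor
          · rintro ⟨i', k', h1, h2, h3, h4, h5⟩
            exact ⟨i', k', h1, h2, by omega, h4, h5⟩
          · rintro ⟨i', k', h1, h2, h3, h4, h5⟩
            refine ⟨i', k', h1, h2, ?_, h4, h5⟩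
            by_contra hcon
            have hk'k : k' = k := by omega
            subst hk'k
            have : PySem.List.pyGetD xs i' 0 ≤ PySem.List.pyGetD xs i 0 :=
              getD_mono hs h1 h2 (by omega)
            omega
        · rw [if_neg hlt, ih (i - 1) k (by omega) hk (by omega)]
          constructor
          · rintro ⟨i', k', h1, h2, h3, h4, h5⟩
            exact ⟨i', k', h1, by omega, h3, h4, h5⟩
          · rintro ⟨i', k', h1, h2, h3, h4, h5⟩
            refine ⟨i', k', h1, ?_, h3, h4, h5⟩
            by_contra hcon
            have hi'i : i' = i := by omega
            subst hi'i
            have : PySem.List.pyGetD xs k 0 ≤ PySem.List.pyGetD xs k' 0 :=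
              getD_mono hs hk h3 h4
            omega
    · rw [dif_neg hguard]
      simp only [Bool.false_eq_true, false_iff]
      rintro ⟨i', k', h1, h2, h3, h4, -⟩
      exact hguard ⟨by omega, by omega⟩

-- B's search succeeds exactly when A's elements contain a strict 3-AP a < m < 2m-a
lemma hasB_iff (A : List Int) :
    has_3ap_alt A = true ↔ ∃ a m, a ∈ A ∧ m ∈ A ∧ a < m ∧ (2 * m - a) ∈ A := by
  unfold has_3ap_alt
  set xs := PySem.List.sorted (PySem.Set.ofList A) (fun x => x) false with hxs
  have hlt : xs.Pairwise (· < ·) := PySem.List.sorted_ofList_pairwise_lt A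
  have hle : xs.Pairwise (· ≤ ·) := hlt.imp (fun h => le_of_lt h)
  have hmem : ∀ z : Int, z ∈ xs ↔ z ∈ A := by
    intro z
    rw [hxs, (PySem.List.sorted_perm _ (fun x => x) false).mem_iff,
        ← PySem.List.dedup_eq_ofList, PySem.List.mem_dedup]
  rw [List.any_eq_true]
  constructor
  · rintro ⟨j, hjmem, hj⟩
    rw [PySem.List.mem_pyRange_one] at hjmem
    rw [twoPtr_iff xs hle j ((j - 1 + 1).toNat + (((xs.length : Int)) - (j + 1)).toNat)
        (j - 1) (j + 1) (le_refl _) (by omega) (by omega)] at hj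
    rcases hj with ⟨p, q, hp0, hpj, hjq, hqn, hsum⟩
    refine ⟨PySem.List.pyGetD xs p 0, PySem.List.pyGetD xs j 0, ?_, ?_, ?_, ?_⟩
    · exact (hmem _).mp (PySem.List.pyGetD_mem xs 0 (by unfold PySem.Raise.InRange; omega))
    · exact (hmem _).mp (PySem.List.pyGetD_mem xs 0 (by unfold PySem.Raise.InRange; omega))
    · exact getD_strict_mono hlt hp0 (by omega) (by omega)
    · have hcq : 2 * PySem.List.pyGetD xs j 0 - PySem.List.pyGetD xs p 0
          = PySem.List.pyGetD xs q 0 := by omega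
      rw [hcq]
      exact (hmem _).mp (PySem.List.pyGetD_mem xs 0 (by unfold PySem.Raise.InRange; omega))
  · rintro ⟨a, m, ha, hm, ham, hc⟩
    have ha' : a ∈ xs := (hmem a).mpr ha
    have hm' : m ∈ xs := (hmem m).mpr hm
    have hc' : (2 * m - a) ∈ xs := (hmem _).mpr hc
    rcases List.mem_iff_getElem.mp ha' with ⟨p, hpn, hpa⟩
    rcases List.mem_iff_getElem.mp hm' with ⟨q, hqn, hqm⟩
    rcases List.mem_iff_getElem.mp hc' with ⟨r, hrn, hrc⟩
    have hpw := List.pairwise_iff_getElem.mp hlt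
    have hpq : p < q := by
      by_contra hcon
      rcases Nat.lt_or_ge q p with h | h
      · have := hpw q p hqn hpn h; omega
      · have : p = q := by omega
        subst this; omega
    have hqr : q < r := by
      by_contra hcon
      rcases Nat.lt_or_ge r q with h | h
      · have := hpw r q hrn hqn h; omega
      · have : q = r := by omega
        subst this; omega
    refine ⟨(q : Int), ?_, ?_⟩
    · rw [PySem.List.mem_pyRange_one]
      constructor <;> [omega; (push_cast; omega)]
    · rw [twoPtr_iff xs hle (q : Int)
          (((q : Int) - 1 + 1).toNat + (((xs.length : Int)) - ((q : Int) + 1)).toNat)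
          ((q : Int) - 1) ((q : Int) + 1) (le_refl _) (by omega) (by omega)]
      refine ⟨(p : Int), (r : Int), by omega, by omega, by omega, by push_cast; omega, ?_⟩
      rw [PySem.List.pyGetD_eq_getElem xs (i := (p : Int)) 0 (by omega) (by omega),
          PySem.List.pyGetD_eq_getElem xs (i := (r : Int)) 0 (by omega) (by omega),
          PySem.List.pyGetD_eq_getElem xs (i := (q : Int)) 0 (by omega) (by omega)]
      simp only [Int.toNat_natCast]
      simp only [hpa, hqm, hrc]
      omega

-- ===== VERDICT (by name: the statement is the Claim_ definition above) =====
theorem has_3ap_spec : Claim_equal_has_3ap := by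
  intro A _
  unfold Spec_has_3ap
  by_cases h : has_3ap A = true
  · rw [h, Eq.comm, hasB_iff]
    exact (hasA_iff A).mp h
  · have hb : ¬ has_3ap_alt A = true := fun hb => h ((hasA_iff A).mpr ((hasB_iff A).mp hb))
    simp only [Bool.not_eq_true] at h hb
    rw [h, hb]
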